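-- pv_equiv track=rewrite | github.com/uRo3YA/TIL | 프로그래머스/전화번호부.py | solution
-- ===== SOURCE A (Python) =====
-- def solution(phone_book):
--     num_dic={}
--     answer = True
--     phone_book.sort()
--     for i in phone_book:
--         phone=i[:2]
--         if phone not in num_dic:
--                 num_dic[phone]=1
--         else:
--                 num_dic[phone]+=1
--         for key,value in num_dic.items():
--             if value>1:
--                 answer=False
--
--     return answer
-- ===== SOURCE B (Python) =====
-- def solution(phone_book):
--     phone_book.sort()  # kept: A mutates its argument in place
--     return len({p[:2] for p in phone_book}) == len(phone_book)
-- ===== Notes on version B (the rewrite author's own statement) =====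
-- stated objective: faster
-- what changed: Replaces the per-element dict-count update with a full rescan of all counts after every insertion by one set comprehension of 2-char prefixes and a single length comparison (the in-place sort is kept).
import Mathlib
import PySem

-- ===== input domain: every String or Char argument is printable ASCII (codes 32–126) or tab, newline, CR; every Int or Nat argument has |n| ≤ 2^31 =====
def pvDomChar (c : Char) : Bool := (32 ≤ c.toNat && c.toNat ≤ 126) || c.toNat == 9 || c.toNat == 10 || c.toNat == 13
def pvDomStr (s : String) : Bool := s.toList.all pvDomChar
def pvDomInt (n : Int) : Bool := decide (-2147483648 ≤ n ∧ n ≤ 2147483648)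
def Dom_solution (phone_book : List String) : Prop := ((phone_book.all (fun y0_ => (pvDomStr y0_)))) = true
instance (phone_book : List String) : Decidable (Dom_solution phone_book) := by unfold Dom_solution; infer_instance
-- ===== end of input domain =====

-- B replaces A's per-insertion dict update plus full rescan of all counts by one set of
-- 2-char prefixes and a single length comparison (the in-place sort of the argument is kept;
-- the equivalence proved here is about the return value).

-- ===== PORT A =====
-- the body of A's 'for i in phone_book' loop: dict update, then the inner rescan of all counts
def solutionStep (s : PySem.Dict String Int × Bool) (i : String) : PySem.Dict String Int × Bool :=
  let phone := PySem.Str.slice i none (some 2)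
  let num_dic :=
    if s.1.contains phone = false then s.1.insert phone 1
    else s.1.insert phone (s.1.getD phone 0 + 1)
  (num_dic, num_dic.items.foldl (fun answer kv => if 1 < kv.2 then false else answer) s.2)

def solution (phone_book : List String) : Bool :=
  ((PySem.List.sorted phone_book (fun x => x) false).foldl solutionStep (PySem.Dict.empty, true)).2

-- ===== PORT B =====
def solution_alt (phone_book : List String) : Bool :=
  let pb := PySem.List.sorted phone_book (fun x => x) false
  decide (PySem.List.len
      (PySem.Set.ofList (pb.map (fun p => PySem.Str.slice p none (some 2))))
    = PySem.List.len pb)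

-- ===== PRECONDITION & SPEC =====
def Spec_solution (phone_book : List String) (out : Bool) : Prop := out = solution_alt phone_book
instance (phone_book : List String) (out : Bool) : Decidable (Spec_solution phone_book out) := by unfold Spec_solution; infer_instance

-- ===== CLAIM (what is proved, stated in full; the proofs are below) =====
def Claim_equal_solution : Prop := ∀ (phone_book : List String), Dom_solution phone_book → Spec_solution phone_book (solution phone_book)

-- ===== LEMMAS AND PROOFS =====

-- the 2-char prefix
def pvPre (p : String) : String := PySem.Str.slice p none (some 2)

-- "some count in the dict exceeds 1" — what A's inner rescan detects
def pvBad (d : PySem.Dict String Int) : Bool := d.items.any (fun kv => decide (1 < kv.2))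

-- the dict component of A's loop, on its own
def pvC (l : List String) (d : PySem.Dict String Int) : PySem.Dict String Int :=
  l.foldl (fun d x => d.insert (pvPre x) (d.getD (pvPre x) 0 + 1)) d

theorem pvInner_eq (L : List (String × Int)) (a : Bool) :
    L.foldl (fun answer kv => if 1 < kv.2 then false else answer) a
      = (a && !L.any (fun kv => decide (1 < kv.2))) := by
  have h : (fun (answer : Bool) (kv : String × Int) => if 1 < kv.2 then false else answer)
      = (fun ok kv => if (fun kv : String × Int => decide (1 < kv.2)) kv = true then false else ok) := by
    funext a kv; by_cases h : (1 : Int) < kv.2 <;> simp [h]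
  rw [h, PySem.List.foldl_if_false_eq]

theorem pvStep_eq (d : PySem.Dict String Int) (a : Bool) (i : String) :
    solutionStep (d, a) i
      = (d.insert (pvPre i) (d.getD (pvPre i) 0 + 1),
         a && !pvBad (d.insert (pvPre i) (d.getD (pvPre i) 0 + 1))) := by
  have hd : (if d.contains (PySem.Str.slice i none (some 2)) = false
        then d.insert (PySem.Str.slice i none (some 2)) 1
        else d.insert (PySem.Str.slice i none (some 2))
          (d.getD (PySem.Str.slice i none (some 2)) 0 + 1))
      = d.insert (PySem.Str.slice i none (some 2))
          (d.getD (PySem.Str.slice i none (some 2)) 0 + 1) := by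
    by_cases hc : d.contains (PySem.Str.slice i none (some 2)) = false
    · simp [hc, PySem.Dict.getD_of_not_contains d 0 hc]
    · simp [hc]
  simp only [solutionStep]
  rw [hd, pvInner_eq]
  simp [pvPre, pvBad]

theorem pvBad_insert (d : PySem.Dict String Int) (k : String)
    (hnd : d.keys.Nodup) (hb : pvBad d = true) :
    pvBad (d.insert k (d.getD k 0 + 1)) = true := by
  unfold pvBad at hb ⊢
  rw [List.any_eq_true] at hb
  obtain ⟨kv, hmem, hv⟩ := hb
  rw [List.any_eq_true]
  by_cases hc : d.contains k = true
  · rw [PySem.Dict.items_insert_of_contains d _ hc]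
    refine ⟨if (kv.1 == k) = true then (k, d.getD k 0 + 1) else kv, List.mem_map_of_mem hmem, ?_⟩
    by_cases hk : (kv.1 == k) = true
    · have hk' : kv.1 = k := by simpa using hk
      have : d.getD k 0 = kv.2 := by
        subst hk'
        exact PySem.Dict.getD_of_mem_items d hmem hnd 0
      simp only [hk, if_pos]
      simp only [decide_eq_true_eq] at hv ⊢
      omega
    · simp [hk, hv]
  · have hc' : d.contains k = false := by simpa using hc
    rw [PySem.Dict.items_insert_of_not_contains d _ hc']
    exact ⟨kv, List.mem_append_left _ hmem, hv⟩

theorem pvBad_C (l : List String) (d : PySem.Dict String Int)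
    (hnd : d.keys.Nodup) (hb : pvBad d = true) : pvBad (pvC l d) = true := by
  induction l generalizing d with
  | nil => exact hb
  | cons x l ih =>
    exact ih _ (PySem.Dict.nodup_keys_insert d _ _ hnd) (pvBad_insert d _ hnd hb)

theorem pvLoop_eq (l : List String) (d : PySem.Dict String Int) (a : Bool)
    (hnd : d.keys.Nodup) :
    l.foldl solutionStep (d, a)
      = (pvC l d, if l.isEmpty then a else a && !pvBad (pvC l d)) := by
  induction l generalizing d a with
  | nil => simp [pvC]
  | cons x l ih =>
    have hd1 : (d.insert (pvPre x) (d.getD (pvPre x) 0 + 1)).keys.Nodup :=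
      PySem.Dict.nodup_keys_insert d _ _ hnd
    rw [List.foldl_cons, pvStep_eq, ih _ _ hd1]
    have hC : pvC (x :: l) d = pvC l (d.insert (pvPre x) (d.getD (pvPre x) 0 + 1)) := rfl
    rw [hC]
    cases hl : l.isEmpty with
    | true =>
      have : l = [] := by simpa using hl
      subst this
      simp [pvC]
    | false =>
      simp only [List.isEmpty_cons, if_neg Bool.false_ne_true]
      cases hb : pvBad (d.insert (pvPre x) (d.getD (pvPre x) 0 + 1)) with
      | true =>
        rw [pvBad_C l _ hd1 hb]
        simp
      | false => simp

theorem pvC_empty (l : List String) :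
    pvC l PySem.Dict.empty = PySem.Dict.counter (l.map pvPre) := by
  rw [← PySem.Dict.foldl_insert_getD_add_one_eq_counter, List.foldl_map]
  rfl

theorem pvBad_counter (xs : List String) :
    pvBad (PySem.Dict.counter xs) = false ↔ xs.Nodup := by
  unfold pvBad
  rw [PySem.Dict.items_counter, List.any_map, List.any_eq_false]
  constructor
  · intro h
    rw [List.nodup_iff_count_le_one]
    intro a
    by_cases ha : a ∈ xs
    · have := h a ((PySem.Set.mem_ofList xs a).mpr ha)
      simp only [Function.comp, decide_eq_true_eq] at this
      exact_mod_cast by omega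
    · simp [List.count_eq_zero_of_not_mem ha]
  · intro h k hk
    have := List.nodup_iff_count_le_one.mp h k
    simp only [Function.comp, decide_eq_true_eq, not_lt]
    exact_mod_cast this

theorem pvOfList_sublist_aux (xs : List String) :
    ∀ (acc pre : List String), acc.Sublist pre →
      (xs.foldl PySem.Set.add acc).Sublist (pre ++ xs) := by
  induction xs with
  | nil => intro acc pre h; simpa using h
  | cons x xs ih =>
    intro acc pre h
    have hstep : (PySem.Set.add acc x).Sublist (pre ++ [x]) := by
      unfold PySem.Set.add
      split
      · exact h.trans (List.sublist_append_left pre [x])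
      · exact h.append_right [x]
    have := ih (PySem.Set.add acc x) (pre ++ [x]) hstep
    simpa using this

theorem pvLen_ofList_iff (xs : List String) :
    (PySem.Set.ofList xs).length = xs.length ↔ xs.Nodup := by
  constructor
  · intro h
    have hsub : (PySem.Set.ofList xs).Sublist xs := by
      have := pvOfList_sublist_aux xs [] [] (List.Sublist.refl [])
      simpa [PySem.Set.ofList_eq_foldl] using this
    have := hsub.eq_of_length h
    rw [← this]
    exact PySem.Set.nodup_ofList xs
  · intro h
    have hperm : (PySem.Set.ofList xs).Perm xs := by
      refine List.perm_of_nodup_nodup_toFinset_eq (PySem.Set.nodup_ofList xs) h ?_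
      ext a
      simp [PySem.Set.mem_ofList]
    exact hperm.length_eq

-- ===== VERDICT (by name: the statement is the Claim_ definition above) =====
theorem solution_spec : Claim_equal_solution := by
  intro phone_book _
  unfold Spec_solution solution solution_alt
  rw [pvLoop_eq _ _ _ PySem.Dict.nodup_keys_empty]
  have hpre : (fun p => PySem.Str.slice p none (some 2)) = pvPre := rfl
  rw [hpre]
  set L := PySem.List.sorted phone_book (fun x => x) false with hL
  cases hl : L.isEmpty with
  | true =>
    have : L = [] := by simpa using hl
    rw [this]
    simp [PySem.List.len]
  | false =>
    simp only [if_neg Bool.false_ne_true, Bool.true_and]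
    rw [pvC_empty]
    have hlen : (L.map pvPre).length = L.length := List.length_map ..
    cases hb : pvBad (PySem.Dict.counter (L.map pvPre)) with
    | false =>
      have hnd : (L.map pvPre).Nodup := (pvBad_counter _).mp hb
      have := (pvLen_ofList_iff (L.map pvPre)).mpr hnd
      simp [PySem.List.len_eq, this, hlen]
    | true =>
      have hnd : ¬ (L.map pvPre).Nodup := by
        intro h
        rw [← pvBad_counter _] at h
        simp [hb] at h
      have : (PySem.Set.ofList (L.map pvPre)).length ≠ (L.map pvPre).length := by
        intro h; exact hnd ((pvLen_ofList_iff _).mp h)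
      simp only [PySem.List.len_eq]
      rw [hlen] at this
      simp [this]
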